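-- pv_equiv track=rewrite | github.com/gprateek93/Distributed_Hash_Tables | Chord/utils.py | contains
-- ===== SOURCE A (Python) =====
-- def contains(start_id, end_id,node_id):
--     '''Keywords: 'start_id' is the starting index of the limit. 'end_id' is the ending index of the limit. 'node_id' is the index of the queried node
--        Function: This function is used to tell if the node id lies in the range (start_id,end_id) or not. '''
--
--     if node_id == start_id or node_id == end_id: #Return False as () is considered.
--         return False
--     elif start_id == end_id: #return true as this will cover the whole circle
--         return True
--     elif start_id > end_id:
--         return not contains(end_id,start_id,node_id) #circular property
--     else:
--         if node_id > start_id and node_id < end_id: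
--             return True
--         return False
-- ===== SOURCE B (Python) =====
-- def contains(start_id, end_id, node_id):
--     # Vote counting: node is strictly inside the circular interval (start_id, end_id)
--     # iff at least two of the three cyclic-order relations hold.
--     return (start_id < node_id) + (node_id < end_id) + (end_id <= start_id) >= 2
-- ===== Notes on version B (the rewrite author's own statement) =====
-- stated objective: alternative
-- what changed: Replaced the four-way branch with recursion by a branch-free arithmetic formulation: count how many of the three cyclic-order relations (start<node, node<end, end<=start) hold and return whether at least two hold.
import Mathlib
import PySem

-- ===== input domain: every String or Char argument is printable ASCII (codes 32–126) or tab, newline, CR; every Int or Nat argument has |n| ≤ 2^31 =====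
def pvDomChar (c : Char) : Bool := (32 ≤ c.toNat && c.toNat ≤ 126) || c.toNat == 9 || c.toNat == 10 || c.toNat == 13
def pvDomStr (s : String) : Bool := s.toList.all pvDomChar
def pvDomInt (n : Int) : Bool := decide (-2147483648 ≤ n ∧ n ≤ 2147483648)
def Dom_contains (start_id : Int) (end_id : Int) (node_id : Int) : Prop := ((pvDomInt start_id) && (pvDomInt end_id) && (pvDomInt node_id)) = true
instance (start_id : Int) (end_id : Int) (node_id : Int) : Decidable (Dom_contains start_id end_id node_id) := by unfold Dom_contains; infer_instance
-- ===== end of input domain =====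

-- B replaces A's branching recursion by a branch-free count of cyclic-order relations (alternative decomposition, same cost).

-- ===== PORT A =====
def contains (start_id : Int) (end_id : Int) (node_id : Int) : Bool :=
  if node_id == start_id || node_id == end_id then false
  else if start_id == end_id then true
  else if start_id > end_id then !(contains end_id start_id node_id)
  else if node_id > start_id && node_id < end_id then true
  else false
termination_by (if start_id > end_id then 1 else 0 : Nat)
decreasing_by simp_all; omega

-- ===== PORT B =====
def contains_alt (start_id : Int) (end_id : Int) (node_id : Int) : Bool :=
  decide (2 ≤ (if start_id < node_id then (1 : Int) else 0)
            + (if node_id < end_id then 1 else 0)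
            + (if end_id ≤ start_id then 1 else 0))

-- ===== PRECONDITION & SPEC =====
def Spec_contains (start_id : Int) (end_id : Int) (node_id : Int) (out : Bool) : Prop := out = contains_alt start_id end_id node_id
instance (start_id : Int) (end_id : Int) (node_id : Int) (out : Bool) : Decidable (Spec_contains start_id end_id node_id out) := by unfold Spec_contains; infer_instance

-- ===== CLAIM =====
def Claim_equal_contains : Prop := ∀ (start_id : Int) (end_id : Int) (node_id : Int), Dom_contains start_id end_id node_id → Spec_contains start_id end_id node_id (contains start_id end_id node_id)

-- ===== LEMMAS AND PROOFS =====
theorem contains_eq (s e n : Int) :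
    contains s e n =
      (if n == s || n == e then false
       else if s == e then true
       else if s > e then !(contains e s n)
       else if n > s && n < e then true
       else false) := by
  rw [contains]

-- ===== VERDICT =====
theorem contains_spec : Claim_equal_contains := by
  intro s e n _
  unfold Spec_contains
  rw [contains_eq s e n, contains_eq e s n]
  unfold contains_alt
  simp only [beq_iff_eq, Bool.or_eq_true]
  split_ifs <;> simp_all <;> omega
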